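-- pv_equiv track=rewrite | github.com/blochberger/ats | main.py | cumulate_sets
-- ===== SOURCE A (Python) =====
-- from typing import Any, Callable, Dict, List, Optional, Set, Tuple, TypeVar
--
-- T = TypeVar('T')
--
-- def cumulate_sets(values: Dict[str, Set[T]], keys: List[str]) -> Dict[str, Set[T]]:
-- 	results: Dict[str, Set[T]] = dict()
-- 	previous: Set[T] = set()
-- 	for key in keys:
-- 		current = values.get(key, set())
-- 		results[key] = previous.union(current)
-- 		previous = results[key]
-- 	return results
-- ===== SOURCE B (Python) =====
-- from typing import Dict, List, Set, TypeVar
--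
-- T = TypeVar('T')
--
-- def cumulate_sets(values: Dict[str, Set[T]], keys: List[str]) -> Dict[str, Set[T]]:
-- 	# Different algorithm: record each element's FIRST key index (discovery pass),
-- 	# then every output set is just the elements discovered at or before that index.
-- 	firsts: List[tuple] = []  # (element, index of first key whose set contains it)
-- 	seen: Set[T] = set()
-- 	for i, key in enumerate(keys):
-- 		for e in values.get(key, set()):
-- 			if e not in seen:
-- 				seen.add(e)
-- 				firsts.append((e, i))
-- 	return {key: {e for e, j in firsts if j <= i} for i, key in enumerate(keys)}
-- ===== Notes on version B (the rewrite author's own statement) =====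
-- stated objective: alternative
-- what changed: Instead of threading a running-union accumulator through one loop, B first inverts the data into a first-occurrence table (element, index of first key containing it) and then builds each key's cumulative set by filtering that table by index.
import Mathlib
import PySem

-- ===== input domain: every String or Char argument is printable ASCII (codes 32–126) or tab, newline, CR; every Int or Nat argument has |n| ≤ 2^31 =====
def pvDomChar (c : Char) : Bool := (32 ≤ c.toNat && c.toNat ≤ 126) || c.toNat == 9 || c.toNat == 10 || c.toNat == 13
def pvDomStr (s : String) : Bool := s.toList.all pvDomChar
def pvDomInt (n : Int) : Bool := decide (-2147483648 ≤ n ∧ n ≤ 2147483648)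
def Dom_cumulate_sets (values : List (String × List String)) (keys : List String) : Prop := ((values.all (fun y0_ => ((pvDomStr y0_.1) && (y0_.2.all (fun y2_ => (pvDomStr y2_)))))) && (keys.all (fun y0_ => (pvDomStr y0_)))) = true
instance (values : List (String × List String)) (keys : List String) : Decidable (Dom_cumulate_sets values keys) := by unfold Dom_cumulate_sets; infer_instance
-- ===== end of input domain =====

-- B replaces A's running-union accumulator by a first-occurrence table plus per-key filtering (alternative decomposition; return values proved equal).

-- ===== PORT A =====
-- one iteration of A's loop: state = (results dict, previous set)
def aStep (values : List (String × List String))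
    (st : PySem.Dict String (List String) × PySem.Set String) (key : String) :
    PySem.Dict String (List String) × PySem.Set String :=
  let current := PySem.Dict.getD (PySem.Dict.mk values) key []
  let merged := PySem.Set.union st.2 current
  (st.1.insert key merged, merged)

def cumulate_sets (values : List (String × List String)) (keys : List String) : List (String × List String) :=
  ((keys.foldl (aStep values) (PySem.Dict.empty, ([] : PySem.Set String))).1).items

-- ===== PORT B =====
-- inner loop of B's discovery pass over one key's set (index i): state = (seen, firsts)
def bInner (i : Int) (st : PySem.Set String × List (String × Int)) (e : String) :
    PySem.Set String × List (String × Int) :=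
  if st.1.contains e then st else (st.1 ++ [e], st.2 ++ [(e, i)])

-- outer discovery pass over enumerate(keys)
def bCollect (values : List (String × List String))
    (st : PySem.Set String × List (String × Int)) (ik : Int × String) :
    PySem.Set String × List (String × Int) :=
  (PySem.Dict.getD (PySem.Dict.mk values) ik.2 []).foldl (bInner ik.1) st

def cumulate_sets_alt (values : List (String × List String)) (keys : List String) : List (String × List String) :=
  let firsts := ((PySem.List.enumerate keys).foldl (bCollect values)
      (([] : PySem.Set String), ([] : List (String × Int)))).2
  ((PySem.List.enumerate keys).foldl
    (fun d ik => d.insert ik.2 ((firsts.filter (fun ej => decide (ej.2 ≤ ik.1))).map Prod.fst))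
    (PySem.Dict.empty : PySem.Dict String (List String))).items

-- ===== PRECONDITION & SPEC =====
def Spec_cumulate_sets (values : List (String × List String)) (keys : List String) (out : List (String × List String)) : Prop := out = cumulate_sets_alt values keys
instance (values : List (String × List String)) (keys : List String) (out : List (String × List String)) : Decidable (Spec_cumulate_sets values keys out) := by unfold Spec_cumulate_sets; infer_instance

-- ===== CLAIM (what is proved, stated in full; the proofs are below) =====
def Claim_equal_cumulate_sets : Prop := ∀ (values : List (String × List String)) (keys : List String), Dom_cumulate_sets values keys → Spec_cumulate_sets values keys (cumulate_sets values keys)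

-- ===== LEMMAS AND PROOFS =====

-- inner pass: the seen component performs exactly Set.add-folding (A's union) and stays the
-- fst-projection of firsts
theorem bInner_spec (i : Int) (cur : List String) :
    ∀ (s : PySem.Set String) (f : List (String × Int)), s = f.map Prod.fst →
      (cur.foldl (bInner i) (s, f)).1 = cur.foldl PySem.Set.add s ∧
      (cur.foldl (bInner i) (s, f)).1 = (cur.foldl (bInner i) (s, f)).2.map Prod.fst := by
  induction cur with
  | nil => intro s f h; exact ⟨rfl, h⟩
  | cons e cur ih =>
    intro s f h
    simp only [List.foldl_cons]
    by_cases hc : e ∈ s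
    · have hstep : bInner i (s, f) e = (s, f) := by simp [bInner, hc]
      rw [hstep, PySem.Set.add_of_mem hc]
      exact ih s f h
    · have hstep : bInner i (s, f) e = (s ++ [e], f ++ [(e, i)]) := by simp [bInner, hc]
      rw [hstep, PySem.Set.add_of_not_mem hc]
      exact ih (s ++ [e]) (f ++ [(e, i)]) (by simp [h])

-- the inner pass only appends to firsts, and every appended entry carries index i
theorem bInner_prefix (i : Int) (cur : List String) :
    ∀ (s : PySem.Set String) (f : List (String × Int)),
      ∃ suf, (cur.foldl (bInner i) (s, f)).2 = f ++ suf ∧ ∀ p ∈ suf, p.2 = i := by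
  induction cur with
  | nil => intro s f; exact ⟨[], by simp, by simp⟩
  | cons e cur ih =>
    intro s f
    simp only [List.foldl_cons]
    by_cases hc : e ∈ s
    · have hstep : bInner i (s, f) e = (s, f) := by simp [bInner, hc]
      rw [hstep]; exact ih s f
    · have hstep : bInner i (s, f) e = (s ++ [e], f ++ [(e, i)]) := by simp [bInner, hc]
      rw [hstep]
      obtain ⟨suf, h1, h2⟩ := ih (s ++ [e]) (f ++ [(e, i)])
      refine ⟨(e, i) :: suf, by simp [h1], ?_⟩
      intro p hp
      rcases List.mem_cons.mp hp with h | h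
      · subst h; rfl
      · exact h2 p h

-- the discovery pass only appends, and every appended entry has index ≥ the starting index
theorem bCollect_prefix (values : List (String × List String)) :
    ∀ (ks : List String) (i : Int) (s : PySem.Set String) (f : List (String × Int)),
      ∃ suf, (((PySem.List.enumerate ks i).foldl (bCollect values) (s, f)).2) = f ++ suf ∧
        ∀ p ∈ suf, i ≤ p.2 := by
  intro ks
  induction ks with
  | nil => intro i s f; exact ⟨[], by simp [PySem.List.enumerate], by simp⟩
  | cons k ks ih =>
    intro i s f
    rw [PySem.List.enumerate_cons, List.foldl_cons]
    have hstep : bCollect values (s, f) (i, k) =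
        ((PySem.Dict.getD (PySem.Dict.mk values) k []).foldl (bInner i) (s, f)) := rfl
    rw [hstep]
    set st := (PySem.Dict.getD (PySem.Dict.mk values) k []).foldl (bInner i) (s, f) with hst
    obtain ⟨suf1, hs1, hs1i⟩ := bInner_prefix i (PySem.Dict.getD (PySem.Dict.mk values) k []) s f
    obtain ⟨suf2, hs2, hs2i⟩ := ih (i + 1) st.1 st.2
    refine ⟨suf1 ++ suf2, ?_, ?_⟩
    · have h12 : st.2 = f ++ suf1 := by rw [hst]; exact hs1
      simp only [Prod.mk.eta] at hs2 ⊢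
      rw [hs2, h12, List.append_assoc]
    · intro p hp
      rcases List.mem_append.mp hp with h | h
      · exact le_of_eq (hs1i p h).symm
      · have := hs2i p h; omega

-- main invariant: A's fold from (d, prev) equals B's insertion fold over the full firsts table
theorem main_inv (values : List (String × List String)) :
    ∀ (ks : List String) (i : Int) (d : PySem.Dict String (List String))
      (prev : PySem.Set String) (f : List (String × Int)),
      prev = f.map Prod.fst →
      (∀ p ∈ f, p.2 < i) →
      (ks.foldl (aStep values) (d, prev)).1 =
        (PySem.List.enumerate ks i).foldl
          (fun d' ik => d'.insert ik.2
            (((((PySem.List.enumerate ks i).foldl (bCollect values) (prev, f)).2).filter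
                (fun ej => decide (ej.2 ≤ ik.1))).map Prod.fst))
          d := by
  intro ks
  induction ks with
  | nil => intro i d prev f _ _; rfl
  | cons k ks ih =>
    intro i d prev f h hlt
    simp only [PySem.List.enumerate_cons, List.foldl_cons]
    have hstep : bCollect values (prev, f) (i, k) =
        ((PySem.Dict.getD (PySem.Dict.mk values) k []).foldl (bInner i) (prev, f)) := rfl
    rw [hstep]
    obtain ⟨h1, h2⟩ := bInner_spec i (PySem.Dict.getD (PySem.Dict.mk values) k []) prev f h
    set st := (PySem.Dict.getD (PySem.Dict.mk values) k []).foldl (bInner i) (prev, f) with hst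
    set full := ((PySem.List.enumerate ks (i + 1)).foldl (bCollect values) (st.1, st.2)).2 with hfull
    have hst_le : ∀ p ∈ st.2, p.2 ≤ i := by
      obtain ⟨suf, hsuf, hsufi⟩ := bInner_prefix i (PySem.Dict.getD (PySem.Dict.mk values) k []) prev f
      rw [← hst] at hsuf
      intro p hp
      rw [hsuf] at hp
      rcases List.mem_append.mp hp with hh | hh
      · exact le_of_lt (hlt p hh)
      · exact le_of_eq (hsufi p hh)
    have hmerged : PySem.Set.union prev (PySem.Dict.getD (PySem.Dict.mk values) k []) = st.1 := by
      rw [hst, h1]; rfl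
    have hfilter : (full.filter (fun ej => decide (ej.2 ≤ i))).map Prod.fst = st.1 := by
      obtain ⟨suf, hsuf, hsufi⟩ := bCollect_prefix values ks (i + 1) st.1 st.2
      rw [← Prod.mk.eta (p := st), ← hfull] at hsuf
      rw [hsuf, List.filter_append]
      have hnil : suf.filter (fun ej => decide (ej.2 ≤ i)) = [] := by
        rw [List.filter_eq_nil_iff]
        intro p hp
        have := hsufi p hp
        simp; omega
      have hself : st.2.filter (fun ej => decide (ej.2 ≤ i)) = st.2 := by
        rw [List.filter_eq_self]
        intro p hp
        simpa using hst_le p hp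
      rw [hnil, hself, List.append_nil, ← h2]
    have hA : aStep values (d, prev) k = (d.insert k st.1, st.1) := by
      simp only [aStep]
      rw [hmerged]
    rw [hA, hfilter]
    have hIH := ih (i + 1) (d.insert k st.1) st.1 st.2 h2 (fun p hp => by have := hst_le p hp; omega)
    rw [← Prod.mk.eta (p := st)] at hIH ⊢
    exact hIH

-- ===== VERDICT (by name: the statement is the Claim_ definition above) =====
theorem cumulate_sets_spec : Claim_equal_cumulate_sets := by
  intro values keys _
  unfold Spec_cumulate_sets cumulate_sets cumulate_sets_alt
  exact congrArg PySem.Dict.items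
    (main_inv values keys 0 PySem.Dict.empty [] [] rfl (by simp))
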